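-- pv_equiv track=rewrite | github.com/theDTrain84/comic-buy-now-predictor | comic-buy-now-predictor/predictor.py | find_hot_comics
-- ===== SOURCE A (Python) =====
-- def find_hot_comics(news_articles, comics):
--     hot_comics = []
--     for comic in comics:
--         title = comic.get("name", "").lower()
--         for article in news_articles:
--             headline = article.get("title", "").lower()
--             if title in headline:
--                 hot_comics.append((comic, article))
--                 break
--     return hot_comics
-- ===== SOURCE B (Python) =====
-- def find_hot_comics(news_articles, comics):
--     # Article-major sweep: lower each comic title once, then scan headlines in
--     # article order, recording for every comic the first article whose headline
--     # contains its title; stop as soon as every comic is matched, then emit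
--     # (comic, article) pairs in comics order.
--     titles = [comic.get("name", "").lower() for comic in comics]
--     matched = [None] * len(comics)
--     for article in news_articles:
--         if all(m is not None for m in matched):
--             break
--         headline = article.get("title", "").lower()
--         for i, t in enumerate(titles):
--             if matched[i] is None and t in headline:
--                 matched[i] = article
--     return [(comic, art) for comic, art in zip(comics, matched) if art is not None]
-- ===== Notes on version B (the rewrite author's own statement) =====
-- stated objective: alternative
-- what changed: B transposes the traversal: instead of A's comic-major nested loop with break per comic, B sweeps the articles once in article order maintaining a per-comic first-match table (titles lowered once up front), stops when every comic is matched, and emits the matched pairs in comics order in a final pass.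
import Mathlib
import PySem

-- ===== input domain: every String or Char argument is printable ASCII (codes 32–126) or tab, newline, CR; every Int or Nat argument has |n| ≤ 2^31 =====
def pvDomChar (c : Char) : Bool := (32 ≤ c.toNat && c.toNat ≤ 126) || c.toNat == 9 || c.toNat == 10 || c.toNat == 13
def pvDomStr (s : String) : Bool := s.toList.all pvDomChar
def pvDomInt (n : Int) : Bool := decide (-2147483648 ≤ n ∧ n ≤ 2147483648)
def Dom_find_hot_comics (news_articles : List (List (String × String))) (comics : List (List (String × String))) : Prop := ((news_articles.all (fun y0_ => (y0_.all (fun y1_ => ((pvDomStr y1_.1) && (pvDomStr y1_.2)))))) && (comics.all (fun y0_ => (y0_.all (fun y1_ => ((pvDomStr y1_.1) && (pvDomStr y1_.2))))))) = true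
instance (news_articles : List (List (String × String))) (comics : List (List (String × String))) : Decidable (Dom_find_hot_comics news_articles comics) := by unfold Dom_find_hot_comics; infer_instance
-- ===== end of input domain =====

-- B transposes the traversal: one sweep over the articles in order, maintaining a per-comic
-- first-match table (titles lowered once), then a final pass emits pairs in comics order. (objective: alternative)

-- shared helpers: `article.get("title", "").lower()` and `comic.get("name", "").lower()`
def pvHdl (article : List (String × String)) : String :=
  PySem.Str.lower (PySem.Dict.getD (PySem.Dict.mk article) "title" "")
def pvTtl (comic : List (String × String)) : String :=
  PySem.Str.lower (PySem.Dict.getD (PySem.Dict.mk comic) "name" "")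

-- ===== PORT A =====
-- inner 'for article in news_articles: … break' — returns the first matching article
def pvAInner (title : String) : List (List (String × String)) → Option (List (String × String))
  | [] => none
  | article :: rest =>
      if PySem.Str.isIn title (pvHdl article) then some article else pvAInner title rest

def find_hot_comics (news_articles : List (List (String × String))) (comics : List (List (String × String))) : List ((List (String × String)) × (List (String × String))) :=
  comics.foldl (fun hot_comics comic =>
    match pvAInner (pvTtl comic) news_articles with
    | some article => hot_comics ++ [(comic, article)]
    | none => hot_comics) []

-- ===== PORT B =====
-- inner 'for i, t in enumerate(titles): if matched[i] is None and t in headline: matched[i] = article'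
-- updates the matched table slot by slot; ported as a map over the table zipped with the titles.
def pvBStep (article : List (String × String)) (m : List (Option (List (String × String)))) (titles : List String) : List (Option (List (String × String))) :=
  let headline := pvHdl article
  (m.zip titles).map (fun p =>
    match p.1 with
    | some a => some a
    | none => if PySem.Str.isIn p.2 headline then some article else none)

-- 'for article in news_articles: if all(m is not None for m in matched): break; …'
def pvBLoop (titles : List String) : List (List (String × String)) → List (Option (List (String × String))) → List (Option (List (String × String)))
  | [], m => m
  | article :: rest, m =>
      if m.all (fun o => o.isSome) then m
      else pvBLoop titles rest (pvBStep article m titles)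

def find_hot_comics_alt (news_articles : List (List (String × String))) (comics : List (List (String × String))) : List ((List (String × String)) × (List (String × String))) :=
  let titles := comics.map pvTtl
  let matched := pvBLoop titles news_articles (titles.map (fun _ => (none : Option (List (String × String)))))
  (comics.zip matched).filterMap (fun p => p.2.map (fun art => (p.1, art)))

-- ===== PRECONDITION & SPEC =====
def Spec_find_hot_comics (news_articles : List (List (String × String))) (comics : List (List (String × String))) (out : List ((List (String × String)) × (List (String × String)))) : Prop := out = find_hot_comics_alt news_articles comics
instance (news_articles : List (List (String × String))) (comics : List (List (String × String))) (out : List ((List (String × String)) × (List (String × String)))) : Decidable (Spec_find_hot_comics news_articles comics out) := by unfold Spec_find_hot_comics; infer_instance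

-- ===== CLAIM (what is proved, stated in full; the proofs are below) =====
def Claim_equal_find_hot_comics : Prop := ∀ (news_articles : List (List (String × String))) (comics : List (List (String × String))), Dom_find_hot_comics news_articles comics → Spec_find_hot_comics news_articles comics (find_hot_comics news_articles comics)

-- ===== LEMMAS AND PROOFS =====
-- A's break-loop is the first article whose lowered headline contains the title.
theorem pvAInner_eq_find? (title : String) (na : List (List (String × String))) :
    pvAInner title na = na.find? (fun art => PySem.Str.isIn title (pvHdl art)) := by
  induction na with
  | nil => rfl
  | cons a rest ih =>
      simp only [pvAInner, List.find?]
      cases h : PySem.Str.isIn title (pvHdl a) with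
      | true => simp
      | false => simp [ih]

-- A's outer accumulator loop is a filterMap over the comics.
theorem pvA_foldl (na : List (List (String × String))) (cs : List (List (String × String)))
    (acc : List ((List (String × String)) × (List (String × String)))) :
    cs.foldl (fun hot_comics comic =>
        match pvAInner (pvTtl comic) na with
        | some article => hot_comics ++ [(comic, article)]
        | none => hot_comics) acc
      = acc ++ cs.filterMap (fun c => (pvAInner (pvTtl c) na).map (fun a => (c, a))) := by
  induction cs generalizing acc with
  | nil => simp
  | cons c rest ih =>
      simp only [List.foldl_cons, List.filterMap_cons]
      cases h : pvAInner (pvTtl c) na with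
      | none => simp only [Option.map_none]; rw [ih]
      | some a => simp only [Option.map_some]; rw [ih]; simp

-- zipping a list with a mapped copy of itself is a map of pairs
theorem pv_zip_map_self {α β : Type} (l : List α) (h : α → β) :
    l.zip (l.map h) = l.map (fun a => (a, h a)) := by
  induction l with
  | nil => rfl
  | cons x xs ih => simp [List.zip_cons_cons, ih]

theorem pv_map_zip_self {α β : Type} (l : List α) (h : α → β) :
    (l.map h).zip l = l.map (fun a => (h a, a)) := by
  induction l with
  | nil => rfl
  | cons x xs ih => simp [List.zip_cons_cons, ih]

-- one article-step over a title table of shape ts.map f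
theorem pvBStep_shape (a : List (String × String)) (ts : List String)
    (f : String → Option (List (String × String))) :
    pvBStep a (ts.map f) ts
      = ts.map (fun t => (f t).or (if PySem.Str.isIn t (pvHdl a) then some a else none)) := by
  unfold pvBStep
  rw [pv_map_zip_self, List.map_map]
  apply List.map_congr_left
  intro t _
  cases hf : f t with
  | some x => simp only [Function.comp_apply]; rw [hf]; simp [Option.or]
  | none => simp only [Function.comp_apply]; rw [hf]; simp [Option.none_or]

-- once every slot is filled, a step changes nothing
theorem pvBStep_fix (a : List (String × String)) (ts : List String)
    (f : String → Option (List (String × String)))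
    (h : ∀ t ∈ ts, (f t).isSome = true) :
    pvBStep a (ts.map f) ts = ts.map f := by
  rw [pvBStep_shape]
  apply List.map_congr_left
  intro t ht
  cases hf : f t with
  | some x => simp [Option.or]
  | none => exact absurd (hf ▸ h t ht) (by simp)

-- B's break is sound: the looped sweep equals the unconditional fold
theorem pvBLoop_eq_foldl (na : List (List (String × String))) (ts : List String)
    (f : String → Option (List (String × String))) :
    pvBLoop ts na (ts.map f) = na.foldl (fun m article => pvBStep article m ts) (ts.map f) := by
  induction na generalizing f with
  | nil => rfl
  | cons a rest ih =>
      simp only [pvBLoop, List.foldl_cons]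
      by_cases h : (ts.map f).all (fun o => o.isSome) = true
      · have hall : ∀ t ∈ ts, (f t).isSome = true := by
          intro t ht
          have := List.all_eq_true.mp h (f t) (List.mem_map_of_mem ht)
          simpa using this
        rw [if_pos h, pvBStep_fix a ts f hall]
        -- the whole remaining fold is also fixed
        clear h ih
        induction rest with
        | nil => rfl
        | cons b brest ihb => rw [List.foldl_cons, pvBStep_fix b ts f hall]; exact ihb
      · rw [if_neg h, pvBStep_shape, ih]

-- B's article sweep: over a title table of shape ts.map f the matched table keeps that shape,
-- and ends holding, per title, the first matching article.
theorem pvB_foldl (na : List (List (String × String))) (ts : List String)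
    (f : String → Option (List (String × String))) :
    na.foldl (fun m article => pvBStep article m ts) (ts.map f)
      = ts.map (fun t => (f t).or (na.find? (fun art => PySem.Str.isIn t (pvHdl art)))) := by
  induction na generalizing f with
  | nil => simp
  | cons a rest ih =>
      simp only [List.foldl_cons]
      rw [pvBStep_shape, ih]
      apply List.map_congr_left
      intro t _
      cases hf : f t with
      | some x => simp [Option.or]
      | none =>
          simp only [Option.none_or, List.find?]
          cases h : PySem.Str.isIn t (pvHdl a) with
          | true => simp [Option.or]
          | false => simp [Option.or]

-- both ports compute the same filterMap of first matches
theorem pvAlt_eq (na : List (List (String × String))) (cs : List (List (String × String))) :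
    find_hot_comics_alt na cs
      = cs.filterMap (fun c => (na.find? (fun art => PySem.Str.isIn (pvTtl c) (pvHdl art))).map (fun a => (c, a))) := by
  show (cs.zip (pvBLoop (cs.map pvTtl) na
      ((cs.map pvTtl).map (fun _ => none)))).filterMap (fun p => p.2.map (fun art => (p.1, art))) = _
  rw [pvBLoop_eq_foldl, pvB_foldl na (cs.map pvTtl) (fun _ => none), List.map_map, pv_zip_map_self, List.filterMap_map]
  apply List.filterMap_congr
  intro c _
  simp [Function.comp]

-- ===== VERDICT (by name: the statement is the Claim_ definition above) =====
theorem find_hot_comics_spec : Claim_equal_find_hot_comics := by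
  intro na cs _
  unfold Spec_find_hot_comics find_hot_comics
  rw [pvA_foldl, pvAlt_eq, List.nil_append]
  apply List.filterMap_congr
  intro c _
  rw [pvAInner_eq_find?]
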